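-- pv_equiv track=rewrite | github.com/Tyrest/TyRepoATCS_19-20 | PythonAdvPractice_2019.py | is_surpassing_phrase
-- ===== SOURCE A (Python) =====
-- def is_surpassing_phrase(input_string):
--     """ Returns true if every word in the input_string is a surpassing
--         word, and false otherwise.
--     """
--     oldDistance = 0
--     for i in range(len(input_string) - 1):
--         newDistance = ord(input_string[i]) - ord(input_string[i+1])
--         if newDistance < oldDistance:
--             return False
--         oldDistance = newDistance
--     return True
-- ===== SOURCE B (Python) =====
-- def is_surpassing_phrase(input_string):
--     """Materialize the adjacent ord-differences with a 0 baseline and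
--     test monotonicity by comparing against the sorted list."""
--     diffs = [ord(a) - ord(b) for a, b in zip(input_string, input_string[1:])]
--     full = [0] + diffs
--     return full == sorted(full)
-- ===== Notes on version B (the rewrite author's own statement) =====
-- stated objective: alternative
-- what changed: Replaced the early-exit indexed scan carrying a running previous-difference with a materialize-then-compare strategy: build the list of adjacent ord-differences prefixed by the 0 baseline and return whether it equals its sorted copy.
import Mathlib
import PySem

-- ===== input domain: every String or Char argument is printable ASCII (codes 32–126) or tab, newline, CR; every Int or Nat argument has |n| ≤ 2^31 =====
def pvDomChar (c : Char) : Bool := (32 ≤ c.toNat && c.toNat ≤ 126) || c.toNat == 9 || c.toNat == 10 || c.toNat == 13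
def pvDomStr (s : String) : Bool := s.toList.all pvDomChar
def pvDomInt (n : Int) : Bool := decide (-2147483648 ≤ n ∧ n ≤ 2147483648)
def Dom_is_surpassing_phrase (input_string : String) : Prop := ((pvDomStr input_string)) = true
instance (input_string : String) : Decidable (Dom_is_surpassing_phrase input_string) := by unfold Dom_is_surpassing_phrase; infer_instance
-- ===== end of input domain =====

-- B replaces A's early-exit scan with "diffs list (0-prefixed) equals its sorted copy"; objective: alternative decomposition.

-- ===== PORT A =====
-- A's loop over i in range(len-1) reading s[i], s[i+1] with an early return,
-- transcribed as structural recursion over adjacent characters carrying oldDistance.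
def pvLoopA : List Char → Int → Bool
  | c1 :: c2 :: rest, oldDistance =>
      let newDistance : Int := (c1.toNat : Int) - (c2.toNat : Int)
      if newDistance < oldDistance then false else pvLoopA (c2 :: rest) newDistance
  | _, _ => true

def is_surpassing_phrase (input_string : String) : Bool :=
  pvLoopA input_string.toList 0

-- ===== PORT B =====
-- diffs = [ord(a) - ord(b) for a, b in zip(s, s[1:])]
def pvDiffsB (cs : List Char) : List Int :=
  (cs.zip cs.tail).map (fun p => (p.1.toNat : Int) - (p.2.toNat : Int))

def is_surpassing_phrase_alt (input_string : String) : Bool :=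
  let full : List Int := (0 : Int) :: pvDiffsB input_string.toList
  decide (full = PySem.List.sorted full (fun x => x) false)

-- ===== PRECONDITION & SPEC =====
def Spec_is_surpassing_phrase (input_string : String) (out : Bool) : Prop := out = is_surpassing_phrase_alt input_string
instance (input_string : String) (out : Bool) : Decidable (Spec_is_surpassing_phrase input_string out) := by unfold Spec_is_surpassing_phrase; infer_instance

-- ===== CLAIM (what is proved, stated in full; the proofs are below) =====
def Claim_equal_is_surpassing_phrase : Prop := ∀ (input_string : String), Dom_is_surpassing_phrase input_string → Spec_is_surpassing_phrase input_string (is_surpassing_phrase input_string)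

-- ===== LEMMAS AND PROOFS =====

-- A's loop decides Chain' (≤) on the differences prefixed with the running baseline.
theorem pvLoopA_chain : ∀ (cs : List Char) (old : Int),
    pvLoopA cs old = decide (List.IsChain (fun a b : Int => a ≤ b) (old :: pvDiffsB cs))
  | [], _ => by simp [pvLoopA, pvDiffsB]
  | [_], _ => by simp [pvLoopA, pvDiffsB]
  | c1 :: c2 :: rest, old => by
      have ih := pvLoopA_chain (c2 :: rest) ((c1.toNat : Int) - (c2.toNat : Int))
      simp only [pvLoopA, pvDiffsB, List.zip_cons_cons, List.tail_cons, List.map_cons,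
        List.isChain_cons_cons] at ih ⊢
      by_cases h : ((c1.toNat : Int) - (c2.toNat : Int)) < old
      · rw [if_pos h]
        symm
        simp only [decide_eq_false_iff_not]
        rintro ⟨h1, -⟩
        omega
      · rw [if_neg h, ih]
        have hle : old ≤ (c1.toNat : Int) - (c2.toNat : Int) := by omega
        simp [hle]

-- A list equals its (identity-key) Python sort iff it is pairwise non-decreasing.
theorem pv_eq_sorted_iff (l : List Int) :
    (l = PySem.List.sorted l (fun x => x) false) ↔ l.Pairwise (fun a b : Int => a ≤ b) := by
  constructor
  · intro h
    have := PySem.List.sorted_pairwise (xs := l) (key := fun x => x)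
    rw [← h] at this
    simpa using this
  · intro h
    exact (PySem.List.sorted_eq_self_of_pairwise l (fun x => x) (by simpa using h)).symm

-- ===== VERDICT (by name: the statement is the Claim_ definition above) =====
theorem is_surpassing_phrase_spec : Claim_equal_is_surpassing_phrase := by
  intro s _
  unfold Spec_is_surpassing_phrase is_surpassing_phrase is_surpassing_phrase_alt
  rw [pvLoopA_chain]
  refine decide_eq_decide.mpr ?_
  rw [List.isChain_iff_pairwise]
  exact (pv_eq_sorted_iff ((0 : Int) :: pvDiffsB s.toList)).symm
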